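-- pv_equiv track=rewrite | github.com/anthonycurtisadler/SLOTHcalc | programmable_calculator.py | bracketed
-- ===== SOURCE A (Python) =====
-- def bracketed (phrase):
--
--      """Returns TRUE if <phrase> is encompassed by a left bracket and a right bracket
--      at the same hierarchical level"""
--
--      level = 0
--      left_point = None
--      right_point = None
--
--
--      for count,char in enumerate(phrase):
--
--           if char == '(':
--                if level == 0:
--                     left_point = count
--                level+=1
--           if char == ')':
--                level-=1
--                if level == 0:
--                     right_point = count
--      if not (left_point is None)  and (not right_point is None) and left_point == 0 and right_point == len(phrase)-1:
--           return True
--      return False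
-- ===== SOURCE B (Python) =====
-- def bracketed(phrase):
--     """Returns TRUE if <phrase> is encompassed by a left bracket and a right bracket
--     at the same hierarchical level"""
--     depths = []
--     d = 0
--     for char in phrase:
--         d += (char == '(') - (char == ')')
--         depths.append(d)
--     return bool(depths) and depths[-1] == 0 and min(depths[:-1], default=0) >= 1
-- ===== Notes on version B (the rewrite author's own statement) =====
-- stated objective: idiomatic
-- what changed: A tracks left_point/right_point positions of top-level brackets in one stateful scan; B instead materializes the running bracket-depth table and answers with aggregate checks (final depth 0, minimum interior depth >= 1).
import Mathlib
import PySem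

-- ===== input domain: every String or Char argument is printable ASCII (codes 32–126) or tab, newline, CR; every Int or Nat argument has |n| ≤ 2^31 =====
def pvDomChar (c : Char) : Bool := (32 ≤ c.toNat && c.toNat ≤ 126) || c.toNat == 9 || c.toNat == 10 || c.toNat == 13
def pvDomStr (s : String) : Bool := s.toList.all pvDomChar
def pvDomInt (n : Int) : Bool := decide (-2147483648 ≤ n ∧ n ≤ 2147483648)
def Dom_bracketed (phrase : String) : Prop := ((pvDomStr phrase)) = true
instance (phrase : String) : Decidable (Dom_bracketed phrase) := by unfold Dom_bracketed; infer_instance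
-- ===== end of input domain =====

-- B replaces A's left_point/right_point bookkeeping by a materialized running-depth
-- table queried with last/min aggregates (idiomatic table-and-aggregate style, same O(n)).

-- ===== PORT A =====
-- one loop iteration of A: state is (level, left_point, right_point), item is (count, char)
def aStep (s : Int × Option Int × Option Int) (p : Int × Char) : Int × Option Int × Option Int :=
  let level := s.1
  let lp := s.2.1
  let rp := s.2.2
  -- if char == '(' : if level == 0: left_point = count ; level += 1
  let lp := if p.2 = '(' ∧ level = 0 then some p.1 else lp
  let level := if p.2 = '(' then level + 1 else level
  -- if char == ')' : level -= 1 ; if level == 0: right_point = count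
  let level' := if p.2 = ')' then level - 1 else level
  let rp := if p.2 = ')' ∧ level' = 0 then some p.1 else rp
  (level', lp, rp)

-- the final 'if not (left_point is None) and ... ' test of A
def aFinish (st : Int × Option Int × Option Int) (n : Int) : Bool :=
  match st.2.1, st.2.2 with
  | some l, some r => decide (l = 0 ∧ r = n - 1)
  | _, _ => false

def bracketedList (cs : List Char) : Bool :=
  aFinish ((PySem.List.enumerate cs).foldl aStep (0, none, none)) cs.length

def bracketed (phrase : String) : Bool := bracketedList phrase.toList

-- ===== PORT B =====
-- d += (char == '(') - (char == ')')
def deltaC (c : Char) : Int := (if c = '(' then 1 else 0) - (if c = ')' then 1 else 0)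

-- the loop building the depths table
def depthsOf : Int → List Char → List Int
  | _, [] => []
  | d, c :: cs => let d' := d + deltaC c; d' :: depthsOf d' cs

-- min(l, default=0)
def pyMin0 : List Int → Int
  | [] => 0
  | x :: xs => xs.foldl min x

def bracketedAltList (cs : List Char) : Bool :=
  !(depthsOf 0 cs).isEmpty && decide ((depthsOf 0 cs).getLast? = some 0)
    && decide (1 ≤ pyMin0 (depthsOf 0 cs).dropLast)

def bracketed_alt (phrase : String) : Bool := bracketedAltList phrase.toList

-- ===== PRECONDITION & SPEC =====
def Spec_bracketed (phrase : String) (out : Bool) : Prop := out = bracketed_alt phrase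
instance (phrase : String) (out : Bool) : Decidable (Spec_bracketed phrase out) := by unfold Spec_bracketed; infer_instance

-- ===== CLAIM (what is proved, stated in full; the proofs are below) =====
def Claim_equal_bracketed : Prop := ∀ (phrase : String), Dom_bracketed phrase → Spec_bracketed phrase (bracketed phrase)

-- ===== LEMMAS AND PROOFS =====

-- canonical form both ports are reduced to
def Qb : Int → List Char → Bool
  | d, [] => decide (d = 0)
  | d, c :: cs => decide (1 ≤ d) && Qb (d + deltaC c) cs

def CF : List Char → Bool
  | [] => false
  | c :: rest => decide (c = '(') && Qb 1 rest

-- left_point can only be set to a some-index ≥ i ≥ 1, so a final some 0 was already there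
theorem lp_stable : ∀ (cs : List Char) (i : Int) (s : Int × Option Int × Option Int),
    1 ≤ i → ((PySem.List.enumerate cs i).foldl aStep s).2.1 = some 0 → s.2.1 = some 0 := by
  intro cs
  induction cs with
  | nil => intro i s _ h; simpa [PySem.List.enumerate_nil] using h
  | cons c cs ih =>
      intro i s hi h
      rw [PySem.List.enumerate_cons, List.foldl_cons] at h
      have h2 := ih (i + 1) (aStep s (i, c)) (by omega) h
      simp only [aStep] at h2
      split_ifs at h2 with h3
      · exact absurd (Option.some.inj h2) (by omega)
      · exact h2

theorem dead_after_drop : ∀ (cs : List Char) (i d : Int) (rp : Option Int),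
    1 ≤ i → d ≤ 0 → (∀ j, rp = some j → j + 1 < i + cs.length) →
    ((PySem.List.enumerate cs i).foldl aStep (d, some 0, rp)).2.1 = some 0 →
    ((PySem.List.enumerate cs i).foldl aStep (d, some 0, rp)).2.2 ≠ some (i + cs.length - 1) := by
  intro cs
  induction cs with
  | nil =>
      intro i d rp hi hd hrp _ hr
      rw [PySem.List.enumerate_nil] at hr
      simp at hr
      have := hrp _ hr
      simp at this
  | cons c cs ih =>
      intro i d rp hi hd hrp hl hr
      rw [PySem.List.enumerate_cons, List.foldl_cons] at hl hr
      by_cases hc : c = '('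
      · by_cases h0 : d = 0
        · -- left_point overwritten with some i, can never be some 0 again
          have := lp_stable cs (i + 1) _ (by omega) hl
          simp only [aStep, hc, h0] at this
          simp at this
          omega
        · have harg : aStep (d, some 0, rp) (i, c) = (d + 1, some 0, rp) := by
            simp [aStep, hc, h0]
          rw [harg] at hl hr
          refine ih (i + 1) (d + 1) rp (by omega) (by omega) (fun j hj => by have := hrp j hj; simp at this ⊢; omega) hl ?_ |>.elim
          have : (i + 1 + (cs.length : Int) - 1) = (i + (↑(c :: cs).length) - 1) := by simp; omega
          rw [this]; exact hr
      · by_cases hc2 : c = ')'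
        · have harg : aStep (d, some 0, rp) (i, c) = (d - 1, some 0, rp) := by
            have : ¬ (d - 1 = 0) := by omega
            simp [aStep, hc, hc2, this]
          rw [harg] at hl hr
          refine ih (i + 1) (d - 1) rp (by omega) (by omega) (fun j hj => by have := hrp j hj; simp at this ⊢; omega) hl ?_ |>.elim
          have : (i + 1 + (cs.length : Int) - 1) = (i + (↑(c :: cs).length) - 1) := by simp; omega
          rw [this]; exact hr
        · have harg : aStep (d, some 0, rp) (i, c) = (d, some 0, rp) := by
            simp [aStep, hc, hc2]
          rw [harg] at hl hr
          refine ih (i + 1) d rp (by omega) hd (fun j hj => by have := hrp j hj; simp at this ⊢; omega) hl ?_ |>.elim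
          have : (i + 1 + (cs.length : Int) - 1) = (i + (↑(c :: cs).length) - 1) := by simp; omega
          rw [this]; exact hr

theorem fold_of_Qb : ∀ (cs : List Char) (i d : Int) (lp rp : Option Int),
    Qb d cs = true → 1 ≤ d →
    (PySem.List.enumerate cs i).foldl aStep (d, lp, rp) = (0, lp, some (i + cs.length - 1)) := by
  intro cs
  induction cs with
  | nil =>
      intro i d lp rp hq hd
      simp [Qb] at hq
      omega
  | cons c cs ih =>
      intro i d lp rp hq hd
      rw [PySem.List.enumerate_cons, List.foldl_cons]
      simp only [Qb, Bool.and_eq_true, decide_eq_true_eq] at hq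
      obtain ⟨_, hq⟩ := hq
      by_cases hc : c = '('
      · have harg : aStep (d, lp, rp) (i, c) = (d + 1, lp, rp) := by
          have : ¬ (d = 0) := by omega
          simp [aStep, hc, this]
        rw [harg]
        have hq' : Qb (d + 1) cs = true := by
          simpa [hc, deltaC] using hq
        rw [ih (i + 1) (d + 1) lp rp hq' (by omega)]
        simp
        omega
      · by_cases hc2 : c = ')'
        · have hq' : Qb (d - 1) cs = true := by
            simpa [hc, hc2, deltaC] using hq
          by_cases h1 : d = 1
          · cases cs with
            | nil =>
                have harg : aStep (d, lp, rp) (i, c) = (0, lp, some i) := by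
                  simp [aStep, hc, hc2, h1]
                rw [harg, PySem.List.enumerate_nil]
                simp
            | cons c' cs' =>
                simp [Qb, h1] at hq'
          · have harg : aStep (d, lp, rp) (i, c) = (d - 1, lp, rp) := by
              have : ¬ (d - 1 = 0) := by omega
              simp [aStep, hc, hc2, this]
            rw [harg, ih (i + 1) (d - 1) lp rp hq' (by omega)]
            simp
            omega
        · have harg : aStep (d, lp, rp) (i, c) = (d, lp, rp) := by
            simp [aStep, hc, hc2]
          have hq' : Qb d cs = true := by
            simpa [hc, hc2, deltaC] using hq
          rw [harg, ih (i + 1) d lp rp hq' hd]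
          simp
          omega

theorem Qb_of_fold : ∀ (cs : List Char) (i d : Int) (rp : Option Int),
    1 ≤ i → 1 ≤ d → (∀ j, rp = some j → j + 1 < i + cs.length) →
    ((PySem.List.enumerate cs i).foldl aStep (d, some 0, rp)).2.1 = some 0 →
    ((PySem.List.enumerate cs i).foldl aStep (d, some 0, rp)).2.2 = some (i + cs.length - 1) →
    Qb d cs = true := by
  intro cs
  induction cs with
  | nil =>
      intro i d rp hi hd hrp hl hr
      rw [PySem.List.enumerate_nil] at hr
      simp at hr
      have := hrp _ hr
      simp at this
  | cons c cs ih =>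
      intro i d rp hi hd hrp hl hr
      rw [PySem.List.enumerate_cons, List.foldl_cons] at hl hr
      by_cases hc : c = '('
      · have harg : aStep (d, some 0, rp) (i, c) = (d + 1, some 0, rp) := by
          have : ¬ (d = 0) := by omega
          simp [aStep, hc, this]
        rw [harg] at hl hr
        have hr' : ((PySem.List.enumerate cs (i+1)).foldl aStep (d + 1, some 0, rp)).2.2
            = some (i + 1 + (cs.length : Int) - 1) := by
          rw [hr]; congr 1; simp; omega
        have := ih (i + 1) (d + 1) rp (by omega) (by omega)
          (fun j hj => by have := hrp j hj; simp at this ⊢; omega) hl hr'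
        have hδ : d + deltaC c = d + 1 := by simp [deltaC, hc]
        simp only [Qb, hδ, this, Bool.and_true]
        exact decide_eq_true (by omega)
      · by_cases hc2 : c = ')'
        · by_cases h1 : d = 1
          · have harg : aStep (d, some 0, rp) (i, c) = (0, some 0, some i) := by
              simp [aStep, hc, hc2, h1]
            rw [harg] at hl hr
            cases cs with
            | nil =>
                simp [Qb, hc, hc2, deltaC, h1]
            | cons c' cs' =>
                exact absurd (by rw [hr]; congr 1; simp; omega)
                  (dead_after_drop (c' :: cs') (i + 1) 0 (some i) (by omega) (by omega)
                    (fun j hj => by simp at hj ⊢; omega) hl)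
          · have harg : aStep (d, some 0, rp) (i, c) = (d - 1, some 0, rp) := by
              have : ¬ (d - 1 = 0) := by omega
              simp [aStep, hc, hc2, this]
            rw [harg] at hl hr
            have hr' : ((PySem.List.enumerate cs (i+1)).foldl aStep (d - 1, some 0, rp)).2.2
                = some (i + 1 + (cs.length : Int) - 1) := by
              rw [hr]; congr 1; simp; omega
            have := ih (i + 1) (d - 1) rp (by omega) (by omega)
              (fun j hj => by have := hrp j hj; simp at this ⊢; omega) hl hr'
            have hδ : d + deltaC c = d - 1 := by unfold deltaC; rw [if_neg hc, if_pos hc2]; ring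
            simp only [Qb, hδ, this, Bool.and_true]
            exact decide_eq_true (by omega)
        · have harg : aStep (d, some 0, rp) (i, c) = (d, some 0, rp) := by
            simp [aStep, hc, hc2]
          rw [harg] at hl hr
          have hr' : ((PySem.List.enumerate cs (i+1)).foldl aStep (d, some 0, rp)).2.2
              = some (i + 1 + (cs.length : Int) - 1) := by
            rw [hr]; congr 1; simp; omega
          have := ih (i + 1) d rp (by omega) hd
            (fun j hj => by have := hrp j hj; simp at this ⊢; omega) hl hr'
          have hδ : d + deltaC c = d := by unfold deltaC; rw [if_neg hc, if_neg hc2]; ring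
          simp only [Qb, hδ, this, Bool.and_true]
          exact decide_eq_true (by omega)

theorem A_eq_CF (cs : List Char) : bracketedList cs = CF cs := by
  cases cs with
  | nil => simp [bracketedList, CF, PySem.List.enumerate_nil, aFinish]
  | cons c rest =>
      unfold bracketedList
      rw [PySem.List.enumerate_cons, List.foldl_cons]
      simp only [zero_add]
      by_cases hc : c = '('
      · have harg : aStep (0, none, none) (0, c) = (1, some 0, none) := by
          simp [aStep, hc]
        rw [harg]
        by_cases hq : Qb 1 rest = true
        · rw [fold_of_Qb rest 1 1 (some 0) none hq (by omega)]
          simp only [CF, hc, decide_true, Bool.true_and, hq, aFinish]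
          apply decide_eq_true
          refine ⟨by trivial, ?_⟩
          simp
        · rcases hfold : (PySem.List.enumerate rest 1).foldl aStep (1, some 0, none)
            with ⟨lv, lp, rp⟩
          have hne : ¬ (lp = some 0 ∧ rp = some (1 + (rest.length : Int) - 1)) := by
            rintro ⟨h1, h2⟩
            exact hq (Qb_of_fold rest 1 1 none (by omega) (by omega) (by simp)
              (by rw [hfold]; exact h1) (by rw [hfold]; exact h2))
          have hcf : CF (c :: rest) = (Qb 1 rest) := by simp [CF, hc]
          rw [hcf, Bool.eq_false_iff.mpr hq]
          cases lp with
          | none => simp [aFinish]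
          | some l =>
              cases rp with
              | none => simp [aFinish]
              | some r =>
                  simp only [aFinish]
                  apply decide_eq_false
                  rintro ⟨h1, h2⟩
                  apply hne
                  refine ⟨by rw [h1], ?_⟩
                  rw [h2]
                  congr 1
                  simp
      · have harg : aStep (0, none, none) (0, c) = ((if c = ')' then -1 else 0), none, none) := by
          by_cases hc2 : c = ')' <;> simp [aStep, hc, hc2]
        rw [harg]
        rcases hfold : (PySem.List.enumerate rest 1).foldl aStep
            ((if c = ')' then -1 else 0), none, none) with ⟨lv, lp, rp⟩
        have hlp : ¬ (lp = some 0) := by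
          intro h0
          have := lp_stable rest 1 ((if c = ')' then -1 else 0), none, none) (by omega)
            (by rw [hfold]; exact h0)
          simp at this
        have hcf : CF (c :: rest) = false := by simp [CF, hc]
        rw [hcf]
        cases lp with
        | none => cases rp <;> simp [aFinish]
        | some l =>
            cases rp with
            | none => simp [aFinish]
            | some r =>
                simp only [aFinish]
                apply decide_eq_false
                rintro ⟨h1, _⟩
                exact hlp (by rw [h1])

theorem min_fold_ge (xs : List Int) : ∀ (x : Int), (1 ≤ List.foldl min x xs) ↔ (1 ≤ x ∧ ∀ y ∈ xs, 1 ≤ y) := by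
  induction xs with
  | nil => intro x; simp
  | cons y ys ih =>
      intro x
      rw [List.foldl_cons, ih (min x y)]
      simp [le_min_iff]
      tauto

theorem Qb_iff_depths (cs : List Char) : ∀ (d : Int),
    Qb d cs = true ↔ ((d :: depthsOf d cs).getLast? = some 0
      ∧ ∀ y ∈ (d :: depthsOf d cs).dropLast, 1 ≤ y) := by
  induction cs with
  | nil => intro d; simp [Qb, depthsOf]
  | cons c cs ih =>
      intro d
      simp only [Qb, depthsOf, Bool.and_eq_true, decide_eq_true_eq]
      rw [ih (d + deltaC c)]
      constructor
      · rintro ⟨h1, h2, h3⟩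
        refine ⟨by simpa using h2, ?_⟩
        intro y hy
        rw [List.dropLast_cons_of_ne_nil (by simp)] at hy
        rcases List.mem_cons.mp hy with h | h
        · omega
        · exact h3 y h
      · rintro ⟨h1, h2⟩
        rw [List.dropLast_cons_of_ne_nil (by simp)] at h2
        refine ⟨h2 d (by simp), by simpa using h1, fun y hy => h2 y (by simp [hy])⟩

theorem B_eq_CF (cs : List Char) : bracketedAltList cs = CF cs := by
  cases cs with
  | nil => simp [bracketedAltList, CF, depthsOf]
  | cons c rest =>
      cases rest with
      | nil =>
          simp [bracketedAltList, CF, depthsOf, pyMin0, Qb]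
      | cons c1 rs =>
          have hd : bracketedAltList (c :: c1 :: rs) = Qb (0 + deltaC c) (c1 :: rs) := by
            unfold bracketedAltList
            set d0 := 0 + deltaC c with hd0
            have hds : depthsOf 0 (c :: c1 :: rs) = d0 :: depthsOf d0 (c1 :: rs) := by
              simp [depthsOf, hd0]
            rcases hds1 : depthsOf d0 (c1 :: rs) with _ | ⟨e, es⟩
            · exact absurd hds1 (by simp [depthsOf])
            · rw [hds, hds1, Bool.eq_iff_iff, Qb_iff_depths, hds1]
              simp only [List.isEmpty_cons, Bool.not_false, Bool.true_and, Bool.and_eq_true,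
                decide_eq_true_eq, List.getLast?_cons_cons,
                List.dropLast_cons_of_ne_nil (List.cons_ne_nil e es), pyMin0]
              rw [min_fold_ge]
              constructor
              · rintro ⟨h1, h2, h3⟩
                refine ⟨h1, fun y hy => ?_⟩
                rcases List.mem_cons.mp hy with h | h
                · exact h ▸ h2
                · exact h3 y h
              · rintro ⟨h1, h2⟩
                exact ⟨h1, h2 d0 (by simp), fun y hy => h2 y (by simp [hy])⟩
          rw [hd]
          by_cases hc : c = '('
          · have h1 : (0 : Int) + deltaC c = 1 := by simp [deltaC, hc]
            rw [h1]
            simp [CF, hc]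
          · have hf : Qb (0 + deltaC c) (c1 :: rs) = false := by
              simp only [Qb, Bool.and_eq_false_iff]
              left
              simpa using (by simp [deltaC, hc]; split_ifs <;> omega : ¬ (1 ≤ 0 + deltaC c))
            rw [hf]
            simp [CF, hc]

-- ===== VERDICT (by name: the statement is the Claim_ definition above) =====
theorem bracketed_spec : Claim_equal_bracketed := by
  intro phrase _
  unfold Spec_bracketed bracketed bracketed_alt
  rw [A_eq_CF, B_eq_CF]
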